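-- pv_equiv track=rewrite | github.com/carlvitzthum/motif-finder | motiffinder/mf_query.py | extract_exons
-- ===== SOURCE A (Python) =====
-- def extract_exons(in_seq):
--     """Takes a given sequence string with lowercase introns and uppercase exons and returns the transcript sequence
--     and a list of exon coordinates within the sequence
--     """
--     total_str = ''
--     temp_str = ''
--     cap_parse = False
--     coords = []
--     for i in range(len(in_seq)):
--         if in_seq[i].isupper():
--             if cap_parse is False:
--                 cap_parse = True
--             temp_str += in_seq[i]
--             if i == (len(in_seq)-1): #last character
--                 coords.append([len(total_str), len(total_str)+len(temp_str)])
--                 total_str += temp_str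
--         else:
--             if cap_parse is True:
--                 coords.append([len(total_str), len(total_str)+len(temp_str)])
--                 total_str += temp_str
--                 temp_str = ''
--                 cap_parse = False
--     return total_str, coords
-- ===== SOURCE B (Python) =====
-- def extract_exons(in_seq):
--     """Two-pointer run scanner: find each maximal uppercase run with an inner
--     index advance, slice it out, and track the transcript offset."""
--     parts = []
--     coords = []
--     off = 0
--     i = 0
--     n = len(in_seq)
--     while i < n:
--         if in_seq[i].isupper():
--             j = i
--             while j < n and in_seq[j].isupper():
--                 j += 1
--             parts.append(in_seq[i:j])
--             coords.append([off, off + (j - i)])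
--             off += j - i
--             i = j
--         else:
--             i += 1
--     return ''.join(parts), coords
-- ===== Notes on version B (the rewrite author's own statement) =====
-- stated objective: alternative
-- what changed: Replaced the per-character flag machine (cap_parse, temp_str, last-character special case) by a two-pointer scan that extracts each maximal uppercase run with an inner index advance and slicing, keeping a running transcript offset.
import Mathlib
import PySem

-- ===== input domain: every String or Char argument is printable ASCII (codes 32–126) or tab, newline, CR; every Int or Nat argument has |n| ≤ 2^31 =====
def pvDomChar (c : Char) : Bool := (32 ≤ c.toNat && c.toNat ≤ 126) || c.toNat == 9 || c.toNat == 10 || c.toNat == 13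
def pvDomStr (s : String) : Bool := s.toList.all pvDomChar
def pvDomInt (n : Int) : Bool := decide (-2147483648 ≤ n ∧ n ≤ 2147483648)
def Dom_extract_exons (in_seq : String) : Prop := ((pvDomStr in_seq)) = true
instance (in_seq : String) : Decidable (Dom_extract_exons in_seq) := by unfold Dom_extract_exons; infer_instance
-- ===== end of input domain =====

-- B replaces A's flag machine with a two-pointer maximal-run scan (objective: alternative, same cost).

-- ===== PORT A =====
-- A's index loop, ported as structural recursion over the character list:
-- `i == len(in_seq)-1` becomes `rest = []`; strings carried as List Char.
def aLoop : List Char → List Char → List Char → Bool → List (List Int) → String × List (List Int)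
  | [], total, _temp, _cap, coords => (String.ofList total, coords)
  | c :: rest, total, temp, cap, coords =>
    if PySem.Chars.isupper c then
      -- cap_parse set to True; temp_str += in_seq[i]
      let temp' := temp ++ [c]
      if rest = [] then  -- last character
        (String.ofList (total ++ temp'),
         coords ++ [[(total.length : Int), (total.length : Int) + (temp'.length : Int)]])
      else aLoop rest total temp' true coords
    else
      if cap then
        aLoop rest (total ++ temp) [] false
          (coords ++ [[(total.length : Int), (total.length : Int) + (temp.length : Int)]])
      else aLoop rest total temp cap coords

def extract_exons (in_seq : String) : String × List (List Int) :=
  aLoop in_seq.toList [] [] false []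

-- ===== PORT B =====
-- B's outer while loop; the inner `while j < n and isupper` index advance is the
-- takeWhile/dropWhile split of the remaining characters, the slice in_seq[i:j] is `run`.
def bLoop : List Char → Int → List (List Char) × List (List Int)
  | [], _off => ([], [])
  | c :: cs, off =>
    if PySem.Chars.isupper c then
      let run := (c :: cs).takeWhile PySem.Chars.isupper
      let r := bLoop ((c :: cs).dropWhile PySem.Chars.isupper) (off + (run.length : Int))
      (run :: r.1, [off, off + (run.length : Int)] :: r.2)
    else bLoop cs off
termination_by cs _ => cs.length
decreasing_by
  · simp only [List.dropWhile_cons, *]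
    simp_all
    exact List.length_dropWhile_le _ _
  · simp

def extract_exons_alt (in_seq : String) : String × List (List Int) :=
  let r := bLoop in_seq.toList 0
  (String.ofList r.1.flatten, r.2)

-- ===== PRECONDITION & SPEC =====
def Spec_extract_exons (in_seq : String) (out : String × List (List Int)) : Prop := out = extract_exons_alt in_seq
instance (in_seq : String) (out : String × List (List Int)) : Decidable (Spec_extract_exons in_seq out) := by unfold Spec_extract_exons; infer_instance

-- ===== CLAIM (what is proved, stated in full; the proofs are below) =====
def Claim_equal_extract_exons : Prop := ∀ (in_seq : String), Dom_extract_exons in_seq → Spec_extract_exons in_seq (extract_exons in_seq)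

-- ===== LEMMAS AND PROOFS =====

-- The head of a non-empty dropWhile result fails the predicate.
theorem pvDropWhileHeadFalse {α : Type} {p : α → Bool} :
    ∀ (l : List α) (d : α) (ds : List α), l.dropWhile p = d :: ds → p d = false := by
  intro l
  induction l with
  | nil => intro d ds h; simp at h
  | cons a l ih =>
    intro d ds h
    rw [List.dropWhile_cons] at h
    by_cases ha : p a = true
    · exact ih d ds (by simpa [ha] using h)
    · simp [ha] at h
      simp [← h.1]
      simpa using ha

-- In the uppercase branch A never reads cap_parse, so the flag value is irrelevant.
theorem aLoop_false_upper (c : Char) (xs total temp : List Char) (coords : List (List Int))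
    (hc : PySem.Chars.isupper c = true) :
    aLoop (c :: xs) total temp false coords = aLoop (c :: xs) total temp true coords := by
  rw [aLoop, aLoop]
  simp [hc]

-- A's loop in mid-run state, run ends at a non-uppercase character: flush.
theorem aLoop_run_flush (run : List Char) :
    ∀ (d : Char) (ds total temp : List Char) (coords : List (List Int)),
    (∀ c ∈ run, PySem.Chars.isupper c = true) → PySem.Chars.isupper d = false →
    aLoop (run ++ d :: ds) total temp true coords =
      aLoop ds (total ++ temp ++ run) [] false
        (coords ++ [[(total.length : Int),
          (total.length : Int) + (temp.length : Int) + (run.length : Int)]]) := by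
  induction run with
  | nil =>
    intro d ds total temp coords _ hd
    simp [aLoop, hd]
  | cons u us ih =>
    intro d ds total temp coords hall hd
    have hu : PySem.Chars.isupper u = true := hall u (by simp)
    have hne : us ++ d :: ds ≠ [] := by simp
    rw [List.cons_append, aLoop]
    simp only [hu, if_neg hne, ite_true]
    rw [ih d ds total (temp ++ [u]) coords (fun c hc => hall c (by simp [hc])) hd]
    simp [List.append_assoc]
    ring_nf

-- A's loop in mid-run state, the run reaches the end of the string.
theorem aLoop_run_end (us : List Char) :
    ∀ (u : Char) (total temp : List Char) (coords : List (List Int)),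
    (∀ c ∈ u :: us, PySem.Chars.isupper c = true) →
    aLoop (u :: us) total temp true coords =
      (String.ofList (total ++ temp ++ u :: us),
       coords ++ [[(total.length : Int),
         (total.length : Int) + (temp.length : Int) + ((u :: us).length : Int)]]) := by
  induction us with
  | nil =>
    intro u total temp coords hall
    have hu : PySem.Chars.isupper u = true := hall u (by simp)
    simp [aLoop, hu]
    omega
  | cons v vs ih =>
    intro u total temp coords hall
    have hu : PySem.Chars.isupper u = true := hall u (by simp)
    have hne : v :: vs ≠ ([] : List Char) := by simp
    rw [aLoop]
    simp only [hu, if_neg hne, ite_true]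
    rw [ih v total (temp ++ [u]) coords (fun c hc => hall c (by simp_all))]
    simp [List.append_assoc]
    omega

-- Main invariant: from a flushed state, A's loop produces B's runs.
theorem aLoop_eq_bLoop (n : ℕ) :
    ∀ (cs : List Char), cs.length ≤ n → ∀ (total : List Char) (coords : List (List Int)),
    aLoop cs total [] false coords =
      (String.ofList (total ++ (bLoop cs (total.length : Int)).1.flatten),
       coords ++ (bLoop cs (total.length : Int)).2) := by
  induction n with
  | zero =>
    intro cs hcs total coords
    have : cs = [] := List.eq_nil_of_length_eq_zero (Nat.le_zero.mp hcs)
    subst this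
    simp [aLoop, bLoop]
  | succ n ih =>
    intro cs hcs total coords
    match cs with
    | [] => simp [aLoop, bLoop]
    | c :: rest =>
      by_cases hc : PySem.Chars.isupper c = true
      · -- maximal uppercase run starting at c
        have hsplit : (c :: rest).takeWhile PySem.Chars.isupper ++
            (c :: rest).dropWhile PySem.Chars.isupper = c :: rest :=
          List.takeWhile_append_dropWhile
        have hallrun : ∀ x ∈ (c :: rest).takeWhile PySem.Chars.isupper,
            PySem.Chars.isupper x = true := fun x hx => List.mem_takeWhile_imp hx
        have hruncons : (c :: rest).takeWhile PySem.Chars.isupper =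
            c :: rest.takeWhile PySem.Chars.isupper := by
          simp [hc]
        rw [aLoop_false_upper c rest total [] coords hc]
        match hdw : (c :: rest).dropWhile PySem.Chars.isupper with
        | [] =>
          -- the run reaches the end of the string
          have hrun : (c :: rest).takeWhile PySem.Chars.isupper = c :: rest := by
            rw [hdw] at hsplit; simpa using hsplit
          have hall : ∀ x ∈ c :: rest, PySem.Chars.isupper x = true := by
            rw [← hrun]; exact hallrun
          rw [aLoop_run_end rest c total [] coords hall]
          rw [bLoop]
          simp [hc, hrun, hdw, bLoop]
        | d :: ds =>
          have hd : PySem.Chars.isupper d = false :=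
            pvDropWhileHeadFalse (c :: rest) d ds hdw
          have hrest_eq : c :: rest = (c :: rest.takeWhile PySem.Chars.isupper) ++ d :: ds := by
            rw [← hruncons]
            rw [hdw] at hsplit
            exact hsplit.symm
          rw [show aLoop (c :: rest) total [] true coords =
              aLoop ((c :: rest.takeWhile PySem.Chars.isupper) ++ d :: ds) total [] true coords by
            rw [← hrest_eq]]
          rw [aLoop_run_flush (c :: rest.takeWhile PySem.Chars.isupper) d ds total [] coords
            (by rw [← hruncons]; exact hallrun) hd]
          have hlends : ds.length ≤ n := by
            have := congrArg List.length hrest_eq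
            simp at this
            simp at hcs
            omega
          rw [ih ds hlends (total ++ [] ++ (c :: rest.takeWhile PySem.Chars.isupper))
            (coords ++ [[(total.length : Int),
              (total.length : Int) + (([] : List Char).length : Int) +
              (((c :: rest.takeWhile PySem.Chars.isupper)).length : Int)]])]
          rw [bLoop]
          simp only [hc, ite_true, hruncons, hdw]
          rw [bLoop]
          simp only [hd, Bool.false_eq_true, if_false]
          simp [List.append_assoc]
      · -- non-uppercase character: both loops skip it
        have hc' : PySem.Chars.isupper c = false := by simpa using hc
        rw [aLoop, bLoop]
        simp only [hc', Bool.false_eq_true, ite_false]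
        exact ih rest (by simpa using Nat.lt_succ_iff.mp (Nat.lt_of_lt_of_le (Nat.lt_succ_self _) (by simpa using hcs))) total coords

-- ===== VERDICT (by name: the statement is the Claim_ definition above) =====
theorem extract_exons_spec : Claim_equal_extract_exons := by
  intro s _
  unfold Spec_extract_exons extract_exons extract_exons_alt
  simpa using aLoop_eq_bLoop s.toList.length s.toList le_rfl [] []
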